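-- pv_equiv track=rewrite | github.com/ivanrukavina/AoC2020 | 8/AoC2020_8.py | calculate_modified
-- ===== SOURCE A (Python) =====
-- def calculate(commands):
--     accumulator = 0
--     position = 0
--     already_visited = []
--     while position not in already_visited and position != len(commands):
--         already_visited.append(position)
--         if commands[position][0] == 'acc':
--             accumulator += int(commands[position][1])
--             position += 1
--         elif commands[position][0] == 'jmp':
--             position += int(commands[position][1])
--         else:
--             position += 1
--     return accumulator, position
--
-- def calculate_modified(commands):
--     for i in commands:
--         if i[0] == 'jmp':
--             i[0] = 'nop'
--             res, pos = calculate(commands)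
--             i[0] = 'jmp'
--             if pos == len(commands):
--                 return res
--         elif i[0] == 'nop':
--             i[0] = 'jmp'
--             res, pos = calculate(commands)
--             i[0] = 'nop'
--             if pos == len(commands):
--                 return res
--     return -1
-- ===== SOURCE B (Python) =====
-- def _first_run(commands):
--     # single run of the unmodified program, recording each position's
--     # first-visit accumulator and the visit order
--     n = len(commands)
--     seen = {}
--     order = []
--     pos = 0
--     acc = 0
--     while pos != n and pos not in seen:
--         seen[pos] = acc
--         order.append(pos)
--         op = commands[pos][0]
--         if op == 'acc':
--             acc += int(commands[pos][1])
--             pos += 1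
--         elif op == 'jmp':
--             pos += int(commands[pos][1])
--         else:
--             pos += 1
--     return acc, pos, seen, order
--
--
-- def _resume(commands, n, acc, pos, prefix):
--     # continue the UNMODIFIED program from a snapshot state; any revisit of an
--     # already-executed position means the patched run would loop forever
--     vis = set(prefix)
--     while pos != n and pos not in vis:
--         vis.add(pos)
--         op = commands[pos][0]
--         if op == 'acc':
--             acc += int(commands[pos][1])
--             pos += 1
--         elif op == 'jmp':
--             pos += int(commands[pos][1])
--         else:
--             pos += 1
--     return acc if pos == n else None
--
--
-- def calculate_modified(commands):
--     # A flip at i only matters if the reference run reaches i: off-path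
--     # candidates terminate iff the reference run does (with its accumulator);
--     # an on-path candidate resumes the ORIGINAL program from the recorded
--     # first-visit snapshot through the flipped successor -- no program is
--     # ever mutated and the shared prefix is never re-simulated.
--     n = len(commands)
--     state = None
--     for i, cmd in enumerate(commands):
--         op = cmd[0]
--         if op == 'jmp' or op == 'nop':
--             if state is None:
--                 state = _first_run(commands)
--             final_acc, final_pos, seen, order = state
--             if i in seen:
--                 k = order.index(i)
--                 succ = i + 1 if op == 'jmp' else i + int(cmd[1])
--                 r = _resume(commands, n, seen[i], succ, order[:k + 1])
--                 if r is not None: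
--                     return r
--             elif final_pos == n:
--                 return final_acc
--     return -1
-- ===== Notes on version B (the rewrite author's own statement) =====
-- stated objective: alternative
-- what changed: Instead of A's flip-mutate-rerun search (a fresh full simulation with a visited-list scan for every jmp/nop candidate), B runs the unmodified program once, recording each position's first-visit accumulator and visit order; candidates off that reference path are decided without any simulation (they terminate iff the reference run does), and an on-path candidate resumes the unmodified program from its recorded snapshot through the flipped successor, with a visited set; nothing is mutated.
-- outside the precondition, e.g. on calculate_modified([['nop', '2'], ['acc', 'x']]): A returns 0, B raises ValueError; on calculate_modified([['jmp', '2']]): A returns 0, B raises IndexError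
import Mathlib
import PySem

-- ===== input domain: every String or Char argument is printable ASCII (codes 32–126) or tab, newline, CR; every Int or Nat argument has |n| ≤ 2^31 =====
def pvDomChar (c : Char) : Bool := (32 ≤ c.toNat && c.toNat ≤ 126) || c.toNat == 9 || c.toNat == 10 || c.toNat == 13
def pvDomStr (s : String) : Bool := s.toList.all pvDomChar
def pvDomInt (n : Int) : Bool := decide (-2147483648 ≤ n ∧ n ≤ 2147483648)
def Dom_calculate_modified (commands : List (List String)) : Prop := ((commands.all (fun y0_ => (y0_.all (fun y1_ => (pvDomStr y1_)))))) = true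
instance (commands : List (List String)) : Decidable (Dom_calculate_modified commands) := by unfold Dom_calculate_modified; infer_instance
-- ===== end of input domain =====

-- B replaces A's try-every-flip-and-rerun search (mutate the list, re-simulate from scratch with a
-- visited LIST) by one reference run of the unmodified program recording each position's first-visit
-- accumulator and visit order: off-path candidates are decided without any simulation (they terminate
-- iff the reference run does), and an on-path candidate resumes the unmodified program once from its
-- recorded snapshot through the flipped successor.  Nothing is ever mutated (A mutates and restores).

-- ===== PORT A =====
-- int(s); total guard .getD 0 is never taken under Pre_ (operands parse)
def pvParseA (s : String) : Int := (PySem.Int.ofStr? s).getD 0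

-- the while-loop of calculate; fuel only makes the loop total, state is A's (accumulator, position, already_visited)
def pvCalcLoop (commands : List (List String)) : Nat → Int → Int → List Int → Int × Int
  | 0, acc, pos, _ => (acc, pos)
  | fuel+1, acc, pos, visited =>
    if ¬ visited.contains pos ∧ pos ≠ (commands.length : Int) then
      if PySem.List.pyGetD (PySem.List.pyGetD commands pos []) 0 "" = "acc" then
        pvCalcLoop commands fuel
          (acc + pvParseA (PySem.List.pyGetD (PySem.List.pyGetD commands pos []) 1 ""))
          (pos + 1) (visited ++ [pos])
      else if PySem.List.pyGetD (PySem.List.pyGetD commands pos []) 0 "" = "jmp" then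
        pvCalcLoop commands fuel acc
          (pos + pvParseA (PySem.List.pyGetD (PySem.List.pyGetD commands pos []) 1 ""))
          (visited ++ [pos])
      else
        pvCalcLoop commands fuel acc (pos + 1) (visited ++ [pos])
    else (acc, pos)

def pvCalculate (commands : List (List String)) : Int × Int :=
  pvCalcLoop commands (commands.length + 1) 0 0 []

-- 'for i in commands' with in-place flip i[0] and restore, ported over the indices
def pvModGo (commands : List (List String)) : List Nat → Int
  | [] => -1
  | j :: rest =>
    if PySem.List.pyGetD (commands.getD j []) 0 "" = "jmp" then
      if (pvCalculate (commands.set j ((commands.getD j []).set 0 "nop"))).2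
          = (commands.length : Int) then
        (pvCalculate (commands.set j ((commands.getD j []).set 0 "nop"))).1
      else pvModGo commands rest
    else if PySem.List.pyGetD (commands.getD j []) 0 "" = "nop" then
      if (pvCalculate (commands.set j ((commands.getD j []).set 0 "jmp"))).2
          = (commands.length : Int) then
        (pvCalculate (commands.set j ((commands.getD j []).set 0 "jmp"))).1
      else pvModGo commands rest
    else pvModGo commands rest

def calculate_modified (commands : List (List String)) : Int :=
  pvModGo commands (List.range commands.length)

-- ===== PORT B =====
def pvParseB (s : String) : Int := (PySem.Int.ofStr? s).getD 0

-- the while loop of _first_run; state (acc, pos, seen, order); fuel only makes the loop total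
def pvOrigLoop (commands : List (List String)) :
    Nat → Int → Int → PySem.Dict Int Int → List Int → Int × Int × PySem.Dict Int Int × List Int
  | 0, acc, pos, seen, order => (acc, pos, seen, order)
  | fuel+1, acc, pos, seen, order =>
    if pos ≠ (commands.length : Int) ∧ ¬ PySem.Dict.contains seen pos then
      if PySem.List.pyGetD (PySem.List.pyGetD commands pos []) 0 "" = "acc" then
        pvOrigLoop commands fuel
          (acc + pvParseB (PySem.List.pyGetD (PySem.List.pyGetD commands pos []) 1 ""))
          (pos + 1) (PySem.Dict.insert seen pos acc) (order ++ [pos])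
      else if PySem.List.pyGetD (PySem.List.pyGetD commands pos []) 0 "" = "jmp" then
        pvOrigLoop commands fuel acc
          (pos + pvParseB (PySem.List.pyGetD (PySem.List.pyGetD commands pos []) 1 ""))
          (PySem.Dict.insert seen pos acc) (order ++ [pos])
      else
        pvOrigLoop commands fuel acc (pos + 1) (PySem.Dict.insert seen pos acc) (order ++ [pos])
    else (acc, pos, seen, order)

def pvFirstRun (commands : List (List String)) : Int × Int × PySem.Dict Int Int × List Int :=
  pvOrigLoop commands (commands.length + 1) 0 0 PySem.Dict.empty []

-- the while loop of _resume; state (acc, pos, vis); fuel only makes the loop total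
def pvResumeLoop (commands : List (List String)) (n : Int) :
    Nat → Int → Int → PySem.Set Int → Int × Int
  | 0, acc, pos, _ => (acc, pos)
  | fuel+1, acc, pos, vis =>
    if pos ≠ n ∧ ¬ PySem.Set.contains vis pos then
      if PySem.List.pyGetD (PySem.List.pyGetD commands pos []) 0 "" = "acc" then
        pvResumeLoop commands n fuel
          (acc + pvParseB (PySem.List.pyGetD (PySem.List.pyGetD commands pos []) 1 ""))
          (pos + 1) (PySem.Set.add vis pos)
      else if PySem.List.pyGetD (PySem.List.pyGetD commands pos []) 0 "" = "jmp" then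
        pvResumeLoop commands n fuel acc
          (pos + pvParseB (PySem.List.pyGetD (PySem.List.pyGetD commands pos []) 1 ""))
          (PySem.Set.add vis pos)
      else
        pvResumeLoop commands n fuel acc (pos + 1) (PySem.Set.add vis pos)
    else (acc, pos)

def pvResume (commands : List (List String)) (n acc pos : Int) (pref : List Int) : Option Int :=
  let r := pvResumeLoop commands n (commands.length + 1) acc pos (PySem.Set.ofList pref)
  if r.2 = n then some r.1 else none

-- 'for i, cmd in enumerate(commands)' with the lazily computed reference-run state threaded
-- through; st = (final_acc, final_pos, seen, order); k's .getD 0 guard is never taken (i in seen => i in order)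
def pvAltGo (commands : List (List String)) (n : Int) :
    Option (Int × Int × PySem.Dict Int Int × List Int) → List (Int × List String) → Int
  | _, [] => -1
  | st?, (i, cmd) :: rest =>
    if PySem.List.pyGetD cmd 0 "" = "jmp" ∨ PySem.List.pyGetD cmd 0 "" = "nop" then
      let st := match st? with
        | none => pvFirstRun commands
        | some s => s
      if PySem.Dict.contains st.2.2.1 i then
        let k := (PySem.List.index? st.2.2.2 i).getD 0
        let succ := if PySem.List.pyGetD cmd 0 "" = "jmp" then i + 1
                    else i + pvParseB (PySem.List.pyGetD cmd 1 "")
        match pvResume commands n (PySem.Dict.getD st.2.2.1 i 0) succ (st.2.2.2.take (k + 1)) with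
        | some r => r
        | none => pvAltGo commands n (some st) rest
      else if st.2.1 = n then st.1
      else pvAltGo commands n (some st) rest
    else pvAltGo commands n st? rest

def calculate_modified_alt (commands : List (List String)) : Int :=
  pvAltGo commands (commands.length : Int) none (PySem.List.enumerate commands 0)

-- ===== PRECONDITION & SPEC =====
-- Pre_ excludes the inputs on which A may hit an exception (IndexError on an empty or 1-element
-- instruction, ValueError from int(), IndexError from a position leaving [0, len]): every
-- instruction must be nonempty, an acc/jmp/nop instruction must carry a parseable integer
-- operand, and a jmp/nop target i+arg must stay in [0, len].  This is conservative: it also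
-- excludes some inputs whose malformed or out-of-range instruction A's search never executes,
-- so A still returns there (and B returns the same value; see cites).
def pvCmdOK (n i : Int) (c : List String) : Bool :=
  match c with
  | [] => false
  | op :: rest =>
    if op = "acc" ∨ op = "jmp" ∨ op = "nop" then
      match rest with
      | [] => false
      | s :: _ =>
        match PySem.Int.ofStr? s with
        | none => false
        | some d => op = "acc" || (decide (0 ≤ i + d) && decide (i + d ≤ n))
    else true

-- a program whose instructions are all nonempty and none of which is a flip candidate
-- (no 'jmp'/'nop' opcode): A's search then tries no flip at all and returns -1
def pvNoCand (commands : List (List String)) : Bool :=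
  commands.all (fun c => !c.isEmpty && !(PySem.List.pyGetD c 0 "" == "jmp")
    && !(PySem.List.pyGetD c 0 "" == "nop"))

def Pre_calculate_modified (commands : List (List String)) : Prop :=
  pvNoCand commands = true ∨
  ∀ p ∈ PySem.List.enumerate commands 0, pvCmdOK (commands.length : Int) p.1 p.2 = true

instance (commands : List (List String)) : Decidable (Pre_calculate_modified commands) := by
  unfold Pre_calculate_modified; infer_instance

def pvWitness_calculate_modified : List (List String) :=
  [["nop", "0"], ["acc", "+1"], ["jmp", "-2"]]

def Spec_calculate_modified (commands : List (List String)) (out : Int) : Prop := out = calculate_modified_alt commands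
instance (commands : List (List String)) (out : Int) : Decidable (Spec_calculate_modified commands out) := by unfold Spec_calculate_modified; infer_instance

-- ===== CLAIM (what is proved, stated in full; the proofs are below) =====
def Claim_equal_calculate_modified : Prop := ∀ (commands : List (List String)), Dom_calculate_modified commands → Pre_calculate_modified commands → Spec_calculate_modified commands (calculate_modified commands)

-- ===== LEMMAS AND PROOFS =====

-- pvParseB is definitionally pvParseA
theorem pvParseBA : pvParseB = pvParseA := rfl

-- the common single step of all four loops: (acc', pos') after executing position pos
def pvStep (l : List (List String)) (acc pos : Int) : Int × Int :=
  if PySem.List.pyGetD (PySem.List.pyGetD l pos []) 0 "" = "acc" then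
    (acc + pvParseA (PySem.List.pyGetD (PySem.List.pyGetD l pos []) 1 ""), pos + 1)
  else if PySem.List.pyGetD (PySem.List.pyGetD l pos []) 0 "" = "jmp" then
    (acc, pos + pvParseA (PySem.List.pyGetD (PySem.List.pyGetD l pos []) 1 ""))
  else (acc, pos + 1)

-- the original run of commands until it first executes position j (proof-side only):
-- some (fuel at the hit, accumulator at the hit, positions executed before the hit)
def pvHitJ (commands : List (List String)) (j : Int) :
    Nat → Int → Int → List Int → Option (Nat × Int × List Int)
  | 0, _, _, _ => none
  | fuel+1, acc, pos, order =>
    if ¬ order.contains pos ∧ pos ≠ (commands.length : Int) then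
      if pos = j then some (fuel+1, acc, order)
      else pvHitJ commands j fuel (pvStep commands acc pos).1 (pvStep commands acc pos).2
        (order ++ [pos])
    else none

-- well-formedness that Pre_ branch 2 gives: each instruction nonempty; acc/jmp/nop have a
-- parseable operand; jmp/nop targets stay in [0, len]
def pvWF (l : List (List String)) : Prop :=
  ∀ k : Nat, (hk : k < l.length) → ∃ op tl, l[k] = op :: tl ∧
    ((op = "acc" ∨ op = "jmp" ∨ op = "nop") →
      ∃ s tl' d, tl = s :: tl' ∧ PySem.Int.ofStr? s = some d ∧
        (op ≠ "acc" → 0 ≤ (k : Int) + d ∧ (k : Int) + d ≤ (l.length : Int)))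

-- number of positions of [0, len] not yet visited: an upper bound on remaining loop iterations
def pvMu (n : Nat) (vis : List Int) : Nat :=
  ((List.range (n+1)).filter (fun m => ! vis.contains ((m : Nat) : Int))).length

theorem pv_pre_destruct (commands : List (List String))
    (hpre : ∀ p ∈ PySem.List.enumerate commands 0,
      pvCmdOK (commands.length : Int) p.1 p.2 = true) : pvWF commands := by
  intro k hk
  have hmem : ((0 : Int) + (k : Int), commands[k]) ∈ PySem.List.enumerate commands 0 := by
    rw [PySem.List.mem_enumerate_iff]
    exact ⟨k, hk, rfl⟩
  have h := hpre _ hmem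
  simp only [pvCmdOK] at h
  rcases hc : commands[k] with _ | ⟨op, tl⟩
  · rw [hc] at h; simp at h
  · rw [hc] at h
    refine ⟨op, tl, rfl, ?_⟩
    intro hop
    simp only [if_pos hop] at h
    rcases tl with _ | ⟨s, tl'⟩
    · simp at h
    · rcases hd : PySem.Int.ofStr? s with _ | d
      · simp only [hd] at h; simp at h
      · refine ⟨s, tl', d, rfl, hd, ?_⟩
        intro hne
        simp only [hd] at h
        simp only [Bool.or_eq_true, Bool.and_eq_true, decide_eq_true_eq] at h
        rcases h with h | h
        · exact absurd (by simpa using h) hne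
        · simpa using h

theorem pvWF_flip (commands : List (List String)) (j : Nat) (hj : j < commands.length)
    (op : String) (tl : List String) (hcmd : commands[j] = op :: tl)
    (hop : op = "jmp" ∨ op = "nop") (hWF : pvWF commands) :
    pvWF (commands.set j ((if op = "jmp" then "nop" else "jmp") :: tl)) := by
  intro k hk
  have hk' : k < commands.length := by simpa using hk
  by_cases hkj : k = j
  · subst hkj
    obtain ⟨op₀, tl₀, hc0, hrest⟩ := hWF k hk'
    rw [hc0] at hcmd
    injection hcmd with h1 h2
    subst h1; subst h2
    refine ⟨(if op₀ = "jmp" then "nop" else "jmp"), tl₀, by simp [List.getElem_set_self], ?_⟩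
    intro _
    obtain ⟨s, tl', d, htl, hd, hr⟩ := hrest (by tauto)
    refine ⟨s, tl', d, htl, hd, ?_⟩
    intro _
    have := hr (by rcases hop with h | h <;> subst h <;> simp)
    simpa [List.length_set] using this
  · obtain ⟨op₀, tl₀, hc0, hrest⟩ := hWF k hk'
    refine ⟨op₀, tl₀, ?_, ?_⟩
    · rw [List.getElem_set_ne (by omega)]
      exact hc0
    · intro hop₀
      obtain ⟨s, tl', d, htl, hd, hr⟩ := hrest hop₀
      exact ⟨s, tl', d, htl, hd, by simpa [List.length_set] using hr⟩

theorem pvGetD_one_head (x y : String) (t : List String) (d : String) :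
    PySem.List.pyGetD (x :: t) 1 d = PySem.List.pyGetD (y :: t) 1 d := by
  cases t <;> simp [PySem.List.pyGetD, PySem.List.pyGet?, PySem.List.pyIdx?]

theorem pv_pyGetD_one {α : Type} (x y : α) (t : List α) (d : α) :
    PySem.List.pyGetD (x :: y :: t) 1 d = y := by
  simp [PySem.List.pyGetD, PySem.List.pyGet?, PySem.List.pyIdx?]

-- reading an in-range set-list at a different nonnegative position
theorem pvGetD_set_ne (commands : List (List String)) (j : Nat) (c : List String)
    (pos : Int) (h0 : 0 ≤ pos) (hne : pos ≠ (j : Int)) :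
    PySem.List.pyGetD (commands.set j c) pos [] = PySem.List.pyGetD commands pos [] := by
  rw [PySem.List.pyGetD_of_nonneg _ _ h0, PySem.List.pyGetD_of_nonneg _ _ h0]
  have hne' : pos.toNat ≠ j := by omega
  by_cases hlt : pos.toNat < commands.length
  · rw [List.getD_eq_getElem _ _ (by simpa using hlt), List.getD_eq_getElem _ _ hlt,
      List.getElem_set_ne (by omega)]
  · rw [List.getD_eq_default _ _ (by simpa using hlt), List.getD_eq_default _ _ (by omega)]

theorem pvStep_set_ne (commands : List (List String)) (j : Nat) (c : List String)
    (acc pos : Int) (h0 : 0 ≤ pos) (hne : pos ≠ (j : Int)) :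
    pvStep (commands.set j c) acc pos = pvStep commands acc pos := by
  simp [pvStep, pvGetD_set_ne commands j c pos h0 hne]

theorem pvStep_bounds (l : List (List String)) (hWF : pvWF l) (acc pos : Int)
    (h0 : 0 ≤ pos) (h1 : pos < (l.length : Int)) :
    0 ≤ (pvStep l acc pos).2 ∧ (pvStep l acc pos).2 ≤ (l.length : Int) := by
  have hk : pos.toNat < l.length := by omega
  obtain ⟨op, tl, hc, hrest⟩ := hWF pos.toNat hk
  have hread : PySem.List.pyGetD l pos [] = op :: tl := by
    rw [PySem.List.pyGetD_of_nonneg _ _ h0, List.getD_eq_getElem _ _ hk, hc]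
  unfold pvStep
  rw [hread]
  by_cases hacc : PySem.List.pyGetD (op :: tl) 0 "" = "acc"
  · rw [if_pos hacc]; constructor <;> simp <;> omega
  · rw [if_neg hacc]
    by_cases hjmp : PySem.List.pyGetD (op :: tl) 0 "" = "jmp"
    · rw [if_pos hjmp]
      simp only [PySem.List.pyGetD_zero_cons] at hjmp
      obtain ⟨s, tl', d, htl, hd, hr⟩ := hrest (by tauto)
      have := hr (by simp [hjmp])
      subst htl
      rw [pv_pyGetD_one]
      have hp : pvParseA s = d := by simp [pvParseA, hd]
      rw [hp]
      constructor <;> simp <;> omega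
    · rw [if_neg hjmp]; constructor <;> simp <;> omega

-- loop-shape lemmas: one step / stop, for each of the three ported loops
theorem pvCalcLoop_step (l : List (List String)) (f : Nat) (acc pos : Int) (vis : List Int)
    (h : ¬ vis.contains pos ∧ pos ≠ (l.length : Int)) :
    pvCalcLoop l (f+1) acc pos vis
      = pvCalcLoop l f (pvStep l acc pos).1 (pvStep l acc pos).2 (vis ++ [pos]) := by
  rw [pvCalcLoop, if_pos h]; unfold pvStep; split_ifs <;> rfl

theorem pvCalcLoop_stop (l : List (List String)) (f : Nat) (acc pos : Int) (vis : List Int)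
    (h : ¬ (¬ vis.contains pos ∧ pos ≠ (l.length : Int))) :
    pvCalcLoop l f acc pos vis = (acc, pos) := by
  cases f with
  | zero => rfl
  | succ f => rw [pvCalcLoop, if_neg h]

theorem pvOrigLoop_step (commands : List (List String)) (f : Nat) (acc pos : Int)
    (seen : PySem.Dict Int Int) (order : List Int)
    (h : pos ≠ (commands.length : Int) ∧ ¬ PySem.Dict.contains seen pos) :
    pvOrigLoop commands (f+1) acc pos seen order
      = pvOrigLoop commands f (pvStep commands acc pos).1 (pvStep commands acc pos).2
          (PySem.Dict.insert seen pos acc) (order ++ [pos]) := by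
  rw [pvOrigLoop, if_pos h]; unfold pvStep; split_ifs <;> rfl

theorem pvOrigLoop_stop (commands : List (List String)) (f : Nat) (acc pos : Int)
    (seen : PySem.Dict Int Int) (order : List Int)
    (h : ¬ (pos ≠ (commands.length : Int) ∧ ¬ PySem.Dict.contains seen pos)) :
    pvOrigLoop commands f acc pos seen order = (acc, pos, seen, order) := by
  cases f with
  | zero => rfl
  | succ f => rw [pvOrigLoop, if_neg h]

theorem pvResumeLoop_step (commands : List (List String)) (n : Int) (f : Nat) (acc pos : Int)
    (vis : PySem.Set Int) (h : pos ≠ n ∧ ¬ PySem.Set.contains vis pos) :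
    pvResumeLoop commands n (f+1) acc pos vis
      = pvResumeLoop commands n f (pvStep commands acc pos).1 (pvStep commands acc pos).2
          (PySem.Set.add vis pos) := by
  rw [pvResumeLoop, if_pos h]; unfold pvStep; rw [pvParseBA]; split_ifs <;> rfl

theorem pvResumeLoop_stop (commands : List (List String)) (n : Int) (f : Nat) (acc pos : Int)
    (vis : PySem.Set Int) (h : ¬ (pos ≠ n ∧ ¬ PySem.Set.contains vis pos)) :
    pvResumeLoop commands n f acc pos vis = (acc, pos) := by
  cases f with
  | zero => rfl
  | succ f => rw [pvResumeLoop, if_neg h]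

-- pvMu facts
theorem pvMu_le (n : Nat) (vis : List Int) : pvMu n vis ≤ n + 1 := by
  calc pvMu n vis ≤ (List.range (n+1)).length := List.length_filter_le _ _
  _ = n + 1 := List.length_range

theorem pvMu_append (n : Nat) (vis : List Int) (pos : Int) (h0 : 0 ≤ pos)
    (h1 : pos ≤ (n : Int)) (h2 : vis.contains pos = false) :
    pvMu n (vis ++ [pos]) + 1 = pvMu n vis := by
  classical
  unfold pvMu
  have hstep : (List.range (n+1)).filter (fun m => ! (vis ++ [pos]).contains ((m:Nat):Int))
      = ((List.range (n+1)).filter (fun m => ! vis.contains ((m:Nat):Int))).filter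
          (fun m => ! (m == pos.toNat)) := by
    rw [List.filter_filter]
    apply List.filter_congr
    intro m _
    by_cases hmp : m = pos.toNat
    · subst hmp
      have h1' : ((pos.toNat : Nat) : Int) = pos := by omega
      simp [h1']
    · have hne : ((m:Nat):Int) ≠ pos := by omega
      simp [hmp, hne]
  rw [hstep]
  set L := (List.range (n+1)).filter (fun m => ! vis.contains ((m : Nat) : Int)) with hL
  have hLnd : L.Nodup := (List.nodup_range).filter _
  have hmemL : pos.toNat ∈ L := by
    rw [hL, List.mem_filter, List.mem_range]
    refine ⟨by omega, ?_⟩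
    simp only [Bool.not_eq_eq_eq_not]
    rw [show ((pos.toNat : Nat) : Int) = pos by omega]
    simpa using h2
  have hcount : L.count pos.toNat = 1 := List.count_eq_one_of_mem hLnd hmemL
  have hlen := List.length_eq_countP_add_countP (fun m => m == pos.toNat) (l := L)
  have hcp : L.countP (fun m => m == pos.toNat) = L.count pos.toNat := rfl
  have hfl : (L.filter (fun m => ! (m == pos.toNat))).length
      = L.countP (fun m => ! (m == pos.toNat)) := List.countP_eq_length_filter.symm
  have hsame : L.countP (fun a => decide ¬(a == pos.toNat) = true)
      = L.countP (fun m => ! (m == pos.toNat)) := by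
    apply List.countP_congr
    intro a _
    by_cases h : a = pos.toNat <;> simp [h]
  rw [hfl]
  omega

theorem pvMu_zero (n : Nat) (vis : List Int) (pos : Int) (h : pvMu n vis = 0)
    (h0 : 0 ≤ pos) (h1 : pos ≤ (n : Int)) : vis.contains pos = true := by
  unfold pvMu at h
  rw [List.length_eq_zero_iff, List.filter_eq_nil_iff] at h
  have := h pos.toNat (by rw [List.mem_range]; omega)
  rw [show ((pos.toNat : Nat) : Int) = pos by omega] at this
  simpa using this

theorem pvMu_nil (n : Nat) : pvMu n [] = n + 1 := by
  simp [pvMu]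

-- fuel stability: beyond pvMu vis steps the loop has stopped, so extra fuel changes nothing
theorem pvCalcLoop_fuel_succ (l : List (List String)) (hWF : pvWF l) :
    ∀ (f : Nat) (acc pos : Int) (vis : List Int), 0 ≤ pos → pos ≤ (l.length : Int) →
      pvMu l.length vis ≤ f →
      pvCalcLoop l (f+1) acc pos vis = pvCalcLoop l f acc pos vis := by
  intro f
  induction f with
  | zero =>
    intro acc pos vis h0 h1 hmu
    have hmu0 : pvMu l.length vis = 0 := by omega
    by_cases hpn : pos = (l.length : Int)
    · rw [pvCalcLoop_stop _ _ _ _ _ (by tauto), pvCalcLoop_stop _ _ _ _ _ (by tauto)]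
    · have hcont := pvMu_zero l.length vis pos hmu0 h0 h1
      have hnc : ¬ (¬ vis.contains pos ∧ pos ≠ (l.length : Int)) := by
        intro hx
        exact hx.1 hcont
      rw [pvCalcLoop_stop _ _ _ _ _ hnc, pvCalcLoop_stop _ _ _ _ _ hnc]
  | succ f ih =>
    intro acc pos vis h0 h1 hmu
    by_cases hc : ¬ vis.contains pos ∧ pos ≠ (l.length : Int)
    · rw [pvCalcLoop_step _ _ _ _ _ hc, pvCalcLoop_step _ _ _ _ _ hc]
      have hlt : pos < (l.length : Int) := lt_of_le_of_ne h1 hc.2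
      obtain ⟨hb0, hb1⟩ := pvStep_bounds l hWF acc pos h0 hlt
      have hmu' := pvMu_append l.length vis pos h0 (by omega)
        (by simpa using hc.1)
      exact ih _ _ _ hb0 hb1 (by omega)
    · rw [pvCalcLoop_stop _ _ _ _ _ hc, pvCalcLoop_stop _ _ _ _ _ hc]

theorem pvCalcLoop_fuel_eq (l : List (List String)) (hWF : pvWF l)
    (f g : Nat) (acc pos : Int) (vis : List Int) (h0 : 0 ≤ pos) (h1 : pos ≤ (l.length : Int))
    (hf : pvMu l.length vis ≤ f) (hg : pvMu l.length vis ≤ g) :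
    pvCalcLoop l f acc pos vis = pvCalcLoop l g acc pos vis := by
  have key : ∀ (b d : Nat), pvMu l.length vis ≤ b →
      pvCalcLoop l (b + d) acc pos vis = pvCalcLoop l b acc pos vis := by
    intro b d hb
    induction d with
    | zero => rfl
    | succ d ihd =>
      rw [show b + (d+1) = (b + d) + 1 by omega,
        pvCalcLoop_fuel_succ l hWF (b + d) acc pos vis h0 h1 (by omega)]
      exact ihd
  rcases le_total f g with hfg | hfg
  · rw [show g = f + (g - f) by omega, key f (g - f) hf]
  · rw [show f = g + (f - g) by omega, key g (f - g) hg]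

-- replaying the prefix: until position j is first executed, the run of the flipped program
-- is the run of the original program
theorem pvHitJ_some_replay (commands : List (List String)) (hWF : pvWF commands) (j : Nat)
    (c : List String) :
    ∀ (f : Nat) (acc pos : Int) (order : List Int) (f' : Nat) (a : Int) (ordJ : List Int),
      0 ≤ pos → pos ≤ (commands.length : Int) →
      pvHitJ commands (j : Int) f acc pos order = some (f', a, ordJ) →
      pvCalcLoop (commands.set j c) f acc pos order
        = pvCalcLoop (commands.set j c) f' a (j : Int) ordJ := by
  intro f
  induction f with
  | zero => intro acc pos order f' a ordJ _ _ hhit; exact absurd hhit (by simp [pvHitJ])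
  | succ f ih =>
    intro acc pos order f' a ordJ h0 h1 hhit
    by_cases hc : ¬ order.contains pos ∧ pos ≠ (commands.length : Int)
    · rw [pvHitJ, if_pos hc] at hhit
      by_cases hpj : pos = (j : Int)
      · rw [if_pos hpj] at hhit
        obtain ⟨he1, he2, he3⟩ : f + 1 = f' ∧ acc = a ∧ order = ordJ := by
          simpa using hhit
        rw [← he1, ← he2, ← he3, hpj]
      · rw [if_neg hpj] at hhit
        have hcF : ¬ order.contains pos ∧ pos ≠ ((commands.set j c).length : Int) := by
          simpa using hc
        rw [pvCalcLoop_step _ _ _ _ _ hcF, pvStep_set_ne commands j c acc pos h0 hpj]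
        have hlt : pos < (commands.length : Int) := lt_of_le_of_ne h1 hc.2
        obtain ⟨hb0, hb1⟩ := pvStep_bounds commands hWF acc pos h0 hlt
        exact ih _ _ _ _ _ _ hb0 hb1 hhit
    · rw [pvHitJ, if_neg hc] at hhit
      exact absurd hhit (by simp)

theorem pvHitJ_none_replay (commands : List (List String)) (hWF : pvWF commands) (j : Nat)
    (c : List String) :
    ∀ (f : Nat) (acc pos : Int) (order : List Int),
      0 ≤ pos → pos ≤ (commands.length : Int) →
      pvHitJ commands (j : Int) f acc pos order = none →
      pvCalcLoop (commands.set j c) f acc pos order = pvCalcLoop commands f acc pos order := by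
  intro f
  induction f with
  | zero => intro acc pos order _ _ _; rfl
  | succ f ih =>
    intro acc pos order h0 h1 hhit
    by_cases hc : ¬ order.contains pos ∧ pos ≠ (commands.length : Int)
    · rw [pvHitJ, if_pos hc] at hhit
      by_cases hpj : pos = (j : Int)
      · rw [if_pos hpj] at hhit
        exact absurd hhit (by simp)
      · rw [if_neg hpj] at hhit
        have hcF : ¬ order.contains pos ∧ pos ≠ ((commands.set j c).length : Int) := by
          simpa using hc
        rw [pvCalcLoop_step _ _ _ _ _ hcF, pvCalcLoop_step _ _ _ _ _ hc,
          pvStep_set_ne commands j c acc pos h0 hpj]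
        have hlt : pos < (commands.length : Int) := lt_of_le_of_ne h1 hc.2
        obtain ⟨hb0, hb1⟩ := pvStep_bounds commands hWF acc pos h0 hlt
        exact ih _ _ _ hb0 hb1 hhit
    · have hcF : ¬ (¬ order.contains pos ∧ pos ≠ ((commands.set j c).length : Int)) := by
        simpa using hc
      rw [pvCalcLoop_stop _ _ _ _ _ hcF, pvCalcLoop_stop _ _ _ _ _ hc]

-- the reference-run loop only appends to order and never overwrites a seen key
theorem pvOrigLoop_order_ext (commands : List (List String)) :
    ∀ (f : Nat) (acc pos : Int) (seen : PySem.Dict Int Int) (order : List Int),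
      ∃ t, (pvOrigLoop commands f acc pos seen order).2.2.2 = order ++ t := by
  intro f
  induction f with
  | zero => intro acc pos seen order; exact ⟨[], by simp [pvOrigLoop]⟩
  | succ f ih =>
    intro acc pos seen order
    by_cases hc : pos ≠ (commands.length : Int) ∧ ¬ PySem.Dict.contains seen pos
    · rw [pvOrigLoop_step _ _ _ _ _ _ hc]
      obtain ⟨t, ht⟩ := ih (pvStep commands acc pos).1 (pvStep commands acc pos).2
        (PySem.Dict.insert seen pos acc) (order ++ [pos])
      exact ⟨[pos] ++ t, by rw [ht, List.append_assoc]⟩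
    · rw [pvOrigLoop_stop _ _ _ _ _ _ hc]
      exact ⟨[], by simp⟩

theorem pvOrigLoop_get_pres (commands : List (List String)) :
    ∀ (f : Nat) (acc pos : Int) (seen : PySem.Dict Int Int) (order : List Int) (q v : Int),
      PySem.Dict.get? seen q = some v →
      PySem.Dict.get? (pvOrigLoop commands f acc pos seen order).2.2.1 q = some v := by
  intro f
  induction f with
  | zero => intro acc pos seen order q v hq; simpa [pvOrigLoop] using hq
  | succ f ih =>
    intro acc pos seen order q v hq
    by_cases hc : pos ≠ (commands.length : Int) ∧ ¬ PySem.Dict.contains seen pos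
    · rw [pvOrigLoop_step _ _ _ _ _ _ hc]
      apply ih
      have hqp : q ≠ pos := by
        intro he
        subst he
        rw [PySem.Dict.contains_eq_isSome_get?, hq] at hc
        simp at hc
      rw [PySem.Dict.get?_insert, if_neg hqp]
      exact hq
    · rw [pvOrigLoop_stop _ _ _ _ _ _ hc]
      exact hq

-- lockstep between pvHitJ and the reference-run loop: what B reads from (seen, order) about j
theorem pvHitJ_orig (commands : List (List String)) (hWF : pvWF commands) (j : Nat) :
    ∀ (f : Nat) (acc pos : Int) (seen : PySem.Dict Int Int) (order : List Int),
      (∀ x : Int, PySem.Dict.contains seen x = order.contains x) →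
      order.Nodup → (∀ x ∈ order, 0 ≤ x ∧ x < (commands.length : Int)) →
      (j : Int) ∉ order → 0 ≤ pos → pos ≤ (commands.length : Int) →
      pvMu commands.length order ≤ f →
      (match pvHitJ commands (j : Int) f acc pos order with
       | none => PySem.Dict.contains (pvOrigLoop commands f acc pos seen order).2.2.1 (j : Int)
           = false
       | some (f', a, ordJ) =>
           PySem.Dict.get? (pvOrigLoop commands f acc pos seen order).2.2.1 (j : Int) = some a ∧
           PySem.List.index? (pvOrigLoop commands f acc pos seen order).2.2.2 (j : Int)
             = some ordJ.length ∧
           (pvOrigLoop commands f acc pos seen order).2.2.2.take (ordJ.length + 1)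
             = ordJ ++ [(j : Int)] ∧
           ordJ.Nodup ∧ (j : Int) ∉ ordJ ∧
           1 ≤ f' ∧ pvMu commands.length (ordJ ++ [(j : Int)]) ≤ f' - 1) := by
  intro f
  induction f with
  | zero =>
    intro acc pos seen order hinv hnd hbd hjno h0 h1 hmu
    simp only [pvHitJ, pvOrigLoop]
    rw [hinv (j : Int)]
    simpa using hjno
  | succ f ih =>
    intro acc pos seen order hinv hnd hbd hjno h0 h1 hmu
    by_cases hc : ¬ order.contains pos ∧ pos ≠ (commands.length : Int)
    · have hcO : pos ≠ (commands.length : Int) ∧ ¬ PySem.Dict.contains seen pos := by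
        refine ⟨hc.2, ?_⟩
        rw [hinv pos]
        exact hc.1
      rw [pvHitJ, if_pos hc, pvOrigLoop_step _ _ _ _ _ _ hcO]
      by_cases hpj : pos = (j : Int)
      · subst hpj
        rw [if_pos rfl]
        have hget : PySem.Dict.get? (PySem.Dict.insert seen ((j : Nat) : Int) acc)
            ((j : Nat) : Int) = some acc := PySem.Dict.get?_insert_self _ _ _
        obtain ⟨t, ht⟩ := pvOrigLoop_order_ext commands f
          (pvStep commands acc ((j : Nat) : Int)).1 (pvStep commands acc ((j : Nat) : Int)).2
          (PySem.Dict.insert seen ((j : Nat) : Int) acc) (order ++ [((j : Nat) : Int)])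
        refine ⟨pvOrigLoop_get_pres commands f _ _ _ _ _ _ hget, ?_, ?_, hnd, ?_,
          by omega, ?_⟩
        · rw [ht, PySem.List.index?_append_of_mem _ (by simp),
            PySem.List.index?_append_singleton_self order _ hjno]
        · rw [ht]
          have hlen : (order ++ [((j : Nat) : Int)]).length = order.length + 1 := by simp
          rw [← hlen, List.take_left]
        · simpa using hjno
        · have := pvMu_append commands.length order ((j : Nat) : Int) h0 (by omega)
            (by simpa using hc.1)
          omega
      · rw [if_neg hpj]
        have hlt : pos < (commands.length : Int) := lt_of_le_of_ne h1 hc.2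
        obtain ⟨hb0, hb1⟩ := pvStep_bounds commands hWF acc pos h0 hlt
        have hmu' := pvMu_append commands.length order pos h0 (by omega) (by simpa using hc.1)
        apply ih
        · intro x
          rw [PySem.Dict.contains_insert]
          by_cases hx : x = pos
          · subst hx; simp
          · simp [hx, hinv x]
        · have hpno : pos ∉ order := by simpa using hc.1
          refine List.Nodup.append hnd (List.nodup_singleton _) ?_
          intro a ha hb
          have : a = pos := by simpa using hb
          subst this
          exact hpno ha
        · intro x hx
          rcases List.mem_append.mp hx with hx | hx
          · exact hbd x hx
          · have : x = pos := by simpa using hx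
            subst this
            exact ⟨h0, hlt⟩
        · intro hj
          rcases List.mem_append.mp hj with hj | hj
          · exact hjno hj
          · have hje : ((j : Nat) : Int) = pos := by simpa using hj
            exact hpj hje.symm
        · exact hb0
        · exact hb1
        · omega
    · have hcO : ¬ (pos ≠ (commands.length : Int) ∧ ¬ PySem.Dict.contains seen pos) := by
        intro hx
        apply hc
        refine ⟨?_, hx.1⟩
        rw [← hinv pos]
        exact hx.2
      rw [pvHitJ, if_neg hc, pvOrigLoop_stop _ _ _ _ _ _ hcO]
      rw [hinv (j : Int)]
      simpa using hjno

-- the resume loop (set-based, unmodified program) is the flipped run continued, once the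
-- flipped position j is already in the visited collection
theorem pvResume_calc (commands : List (List String)) (hWF : pvWF commands) (j : Nat)
    (c : List String) :
    ∀ (f : Nat) (acc pos : Int) (vis : List Int) (st : PySem.Set Int),
      (∀ x : Int, vis.contains x = PySem.Set.contains st x) → (j : Int) ∈ vis →
      0 ≤ pos → pos ≤ (commands.length : Int) →
      pvResumeLoop commands (commands.length : Int) f acc pos st
        = pvCalcLoop (commands.set j c) f acc pos vis := by
  intro f
  induction f with
  | zero => intro acc pos vis st _ _ _ _; rfl
  | succ f ih =>
    intro acc pos vis st hm hjv h0 h1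
    by_cases hcR : pos ≠ (commands.length : Int) ∧ ¬ PySem.Set.contains st pos
    · have hvf : vis.contains pos = false := by
        rw [hm pos]
        simpa using hcR.2
      have hnm : pos ∉ vis := by simpa using hvf
      have hcC : ¬ vis.contains pos ∧ pos ≠ ((commands.set j c).length : Int) := by
        refine ⟨by rw [hvf]; simp, by simpa using hcR.1⟩
      have hne : pos ≠ ((j : Nat) : Int) := by
        intro he
        rw [he] at hnm
        exact hnm hjv
      rw [pvResumeLoop_step _ _ _ _ _ _ hcR, pvCalcLoop_step _ _ _ _ _ hcC,
        pvStep_set_ne commands j c acc pos h0 hne]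
      have hlt : pos < (commands.length : Int) := lt_of_le_of_ne h1 hcR.1
      obtain ⟨hb0, hb1⟩ := pvStep_bounds commands hWF acc pos h0 hlt
      apply ih _ _ _ _ ?_ (by simp [hjv]) hb0 hb1
      intro x
      have hadd : PySem.Set.add st pos = st ++ [pos] := by
        simp only [PySem.Set.add]
        rw [if_neg (by simpa using hcR.2)]
      have hmx := hm x
      rw [PySem.Set.contains_eq_listContains] at hmx
      rw [PySem.Set.contains_eq_listContains, hadd]
      have hmem : decide (x ∈ vis) = decide (x ∈ st) := by simpa using hmx
      simp [hmem]
    · have hcC : ¬ (¬ vis.contains pos ∧ pos ≠ ((commands.set j c).length : Int)) := by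
        intro hx
        apply hcR
        refine ⟨by simpa using hx.2, ?_⟩
        rw [← hm pos]
        simpa using hx.1
      rw [pvResumeLoop_stop _ _ _ _ _ _ hcR, pvCalcLoop_stop _ _ _ _ _ hcC]

-- the unflipped A-loop and the reference-run loop agree on (accumulator, position)
theorem pvCalc_orig (commands : List (List String)) :
    ∀ (f : Nat) (acc pos : Int) (seen : PySem.Dict Int Int) (order : List Int),
      (∀ x : Int, PySem.Dict.contains seen x = order.contains x) →
      ((pvCalcLoop commands f acc pos order).1
          = (pvOrigLoop commands f acc pos seen order).1 ∧
       (pvCalcLoop commands f acc pos order).2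
          = (pvOrigLoop commands f acc pos seen order).2.1) := by
  intro f
  induction f with
  | zero => intro acc pos seen order _; exact ⟨rfl, rfl⟩
  | succ f ih =>
    intro acc pos seen order hinv
    by_cases hc : pos ≠ (commands.length : Int) ∧ ¬ PySem.Dict.contains seen pos
    · have hcC : ¬ order.contains pos ∧ pos ≠ (commands.length : Int) := by
        refine ⟨?_, hc.1⟩
        rw [← hinv pos]
        simpa using hc.2
      rw [pvCalcLoop_step _ _ _ _ _ hcC, pvOrigLoop_step _ _ _ _ _ _ hc]
      apply ih
      intro x
      rw [PySem.Dict.contains_insert]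
      by_cases hx : x = pos
      · subst hx; simp
      · simp [hx, hinv x]
    · have hcC : ¬ (¬ order.contains pos ∧ pos ≠ (commands.length : Int)) := by
        intro hx
        apply hc
        refine ⟨hx.2, ?_⟩
        rw [hinv pos]
        simpa using hx.1
      rw [pvCalcLoop_stop _ _ _ _ _ hcC, pvOrigLoop_stop _ _ _ _ _ _ hc]
      exact ⟨rfl, rfl⟩

theorem pv_enum_map {α : Type} (xs : List α) (d : α) : ∀ s : Int,
    PySem.List.enumerate xs s
      = (List.range xs.length).map (fun (k : Nat) => (s + (k : Int), xs.getD k d)) := by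
  induction xs with
  | nil => intro s; rfl
  | cons x xs ihx =>
    intro s
    rw [PySem.List.enumerate_cons, ihx (s + 1)]
    rw [List.length_cons, List.range_succ_eq_map]
    simp only [List.map_cons, List.map_map, Function.comp_def, List.getD_cons_succ,
      List.getD_cons_zero, Nat.cast_zero, add_zero, Nat.cast_succ]
    congr 1
    apply List.map_congr_left
    intro k _
    congr 1
    ring

-- list-contains agrees with set-contains of its dedup
theorem pvContains_ofList (l : List Int) (x : Int) :
    l.contains x = PySem.Set.contains (PySem.Set.ofList l) x := by
  rw [PySem.Set.contains_eq_listContains]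
  by_cases hx : x ∈ l
  · have hx' : x ∈ PySem.Set.ofList l := (PySem.Set.mem_ofList l x).mpr hx
    simp [hx, hx']
  · have hx' : x ∉ PySem.Set.ofList l := fun h => hx ((PySem.Set.mem_ofList l x).mp h)
    simp [hx, hx']

-- what one flip candidate evaluates to on each side: either k is off the reference path and the
-- flipped run IS the reference run, or it is on the path and B's resume reproduces it
theorem pv_cand_eq (commands : List (List String)) (hWF : pvWF commands)
    (k : Nat) (hk : k < commands.length) (op : String) (tl : List String)
    (hc0 : commands[k] = op :: tl) (hop : op = "jmp" ∨ op = "nop") :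
    (PySem.Dict.contains (pvFirstRun commands).2.2.1 ((k : Nat) : Int) = false ∧
      (pvCalculate (commands.set k ((if op = "jmp" then "nop" else "jmp") :: tl))).1
        = (pvFirstRun commands).1 ∧
      (pvCalculate (commands.set k ((if op = "jmp" then "nop" else "jmp") :: tl))).2
        = (pvFirstRun commands).2.1) ∨
    (PySem.Dict.contains (pvFirstRun commands).2.2.1 ((k : Nat) : Int) = true ∧
      pvResume commands (commands.length : Int)
        (PySem.Dict.getD (pvFirstRun commands).2.2.1 ((k : Nat) : Int) 0)
        (if op = "jmp" then ((k : Nat) : Int) + 1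
         else ((k : Nat) : Int) + pvParseB (PySem.List.pyGetD (op :: tl) 1 ""))
        ((pvFirstRun commands).2.2.2.take
          ((PySem.List.index? (pvFirstRun commands).2.2.2 ((k : Nat) : Int)).getD 0 + 1))
      = (if (pvCalculate (commands.set k ((if op = "jmp" then "nop" else "jmp") :: tl))).2
            = (commands.length : Int)
         then some (pvCalculate (commands.set k
              ((if op = "jmp" then "nop" else "jmp") :: tl))).1
         else none)) := by
  have hWFF : pvWF (commands.set k ((if op = "jmp" then "nop" else "jmp") :: tl)) :=
    pvWF_flip commands k hk op tl hc0 hop hWF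
  have hlenF : (commands.set k ((if op = "jmp" then "nop" else "jmp") :: tl)).length
      = commands.length := by simp
  have horig := pvHitJ_orig commands hWF k (commands.length + 1) 0 0 PySem.Dict.empty []
    (by intro x; simp) List.nodup_nil (by intro x hx; simp at hx) (by simp)
    le_rfl (by positivity) (by rw [pvMu_nil])
  have hcalc : pvCalculate (commands.set k ((if op = "jmp" then "nop" else "jmp") :: tl))
      = pvCalcLoop (commands.set k ((if op = "jmp" then "nop" else "jmp") :: tl))
          (commands.length + 1) 0 0 [] := by
    unfold pvCalculate
    rw [hlenF]
  rcases hhit : pvHitJ commands ((k : Nat) : Int) (commands.length + 1) 0 0 [] with _ | ⟨f', a, ordJ⟩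
  · -- k never executed by the reference run: the flipped run IS the reference run
    rw [hhit] at horig
    left
    refine ⟨horig, ?_, ?_⟩ <;>
    · rw [hcalc, pvHitJ_none_replay commands hWF k _ _ _ _ _ le_rfl (by positivity) hhit]
      have := pvCalc_orig commands (commands.length + 1) 0 0 PySem.Dict.empty []
        (by intro x; simp)
      unfold pvFirstRun
      tauto
  · -- k is on the reference path: replay prefix, one flipped step, then the resume loop
    rw [hhit] at horig
    obtain ⟨hget, hidx, htake, hnd', hjn', hf'1, hmu'⟩ := horig
    right
    have hcont : PySem.Dict.contains (pvFirstRun commands).2.2.1 ((k : Nat) : Int) = true := by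
      rw [PySem.Dict.contains_eq_isSome_get?]
      unfold pvFirstRun
      rw [hget]
      rfl
    refine ⟨hcont, ?_⟩
    -- the value B feeds to resume
    have hgetD : PySem.Dict.getD (pvFirstRun commands).2.2.1 ((k : Nat) : Int) 0 = a := by
      rw [PySem.Dict.getD_eq_get?_getD]
      unfold pvFirstRun
      rw [hget]
      rfl
    have hkD : (PySem.List.index? (pvFirstRun commands).2.2.2 ((k : Nat) : Int)).getD 0
        = ordJ.length := by
      unfold pvFirstRun
      rw [hidx]
      rfl
    have htk : (pvFirstRun commands).2.2.2.take
        ((PySem.List.index? (pvFirstRun commands).2.2.2 ((k : Nat) : Int)).getD 0 + 1)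
        = ordJ ++ [((k : Nat) : Int)] := by
      rw [hkD]
      unfold pvFirstRun
      exact htake
    -- the flipped step at k
    obtain ⟨f'', rfl⟩ : ∃ f'', f' = f'' + 1 := ⟨f' - 1, by omega⟩
    have hreadF : PySem.List.pyGetD (commands.set k ((if op = "jmp" then "nop" else "jmp") :: tl))
        ((k : Nat) : Int) [] = (if op = "jmp" then "nop" else "jmp") :: tl := by
      rw [PySem.List.pyGetD_natCast, List.getD_eq_getElem _ _ (by simpa using hk),
        List.getElem_set_self]
    have hstep : pvStep (commands.set k ((if op = "jmp" then "nop" else "jmp") :: tl)) a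
        ((k : Nat) : Int)
        = (a, if op = "jmp" then ((k : Nat) : Int) + 1
              else ((k : Nat) : Int) + pvParseB (PySem.List.pyGetD (op :: tl) 1 "")) := by
      unfold pvStep
      rw [hreadF]
      rcases hop with h | h
      · subst h
        simp
      · subst h
        simp only [String.reduceEq, reduceIte, pvParseBA]
        rw [pvGetD_one_head "jmp" "nop" tl]
        simp
    have hcond : ¬ ordJ.contains ((k : Nat) : Int) ∧ ((k : Nat) : Int)
        ≠ ((commands.set k ((if op = "jmp" then "nop" else "jmp") :: tl)).length : Int) := by
      constructor
      · simpa using hjn'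
      · rw [hlenF]
        intro he
        have : k < commands.length := hk
        omega
    have hA : pvCalculate (commands.set k ((if op = "jmp" then "nop" else "jmp") :: tl))
        = pvCalcLoop (commands.set k ((if op = "jmp" then "nop" else "jmp") :: tl)) f''
            a (if op = "jmp" then ((k : Nat) : Int) + 1
               else ((k : Nat) : Int) + pvParseB (PySem.List.pyGetD (op :: tl) 1 ""))
            (ordJ ++ [((k : Nat) : Int)]) := by
      rw [hcalc, pvHitJ_some_replay commands hWF k _ _ _ _ _ _ _ _ le_rfl (by positivity) hhit,
        pvCalcLoop_step _ _ _ _ _ hcond, hstep]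
    -- bounds on the flipped successor
    have hb := pvStep_bounds (commands.set k ((if op = "jmp" then "nop" else "jmp") :: tl))
      hWFF a ((k : Nat) : Int) (by positivity) (by rw [hlenF]; exact_mod_cast hk)
    rw [hstep] at hb
    have hb0 : 0 ≤ (if op = "jmp" then ((k : Nat) : Int) + 1
        else ((k : Nat) : Int) + pvParseB (PySem.List.pyGetD (op :: tl) 1 "")) := by
      simpa using hb.1
    have hb1 : (if op = "jmp" then ((k : Nat) : Int) + 1
        else ((k : Nat) : Int) + pvParseB (PySem.List.pyGetD (op :: tl) 1 ""))
        ≤ (commands.length : Int) := by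
      rw [← hlenF]
      simpa using hb.2
    -- B's resume is the flipped run continued, with enough fuel on both sides
    have hres : pvResumeLoop commands (commands.length : Int) (commands.length + 1) a
        (if op = "jmp" then ((k : Nat) : Int) + 1
         else ((k : Nat) : Int) + pvParseB (PySem.List.pyGetD (op :: tl) 1 ""))
        (PySem.Set.ofList (ordJ ++ [((k : Nat) : Int)]))
        = pvCalcLoop (commands.set k ((if op = "jmp" then "nop" else "jmp") :: tl))
            (commands.length + 1) a
            (if op = "jmp" then ((k : Nat) : Int) + 1
             else ((k : Nat) : Int) + pvParseB (PySem.List.pyGetD (op :: tl) 1 ""))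
            (ordJ ++ [((k : Nat) : Int)]) :=
      pvResume_calc commands hWF k _ _ _ _ _ _
        (fun x => pvContains_ofList _ x) (by simp) hb0 hb1
    have hfuel : pvCalcLoop (commands.set k ((if op = "jmp" then "nop" else "jmp") :: tl))
        (commands.length + 1) a
        (if op = "jmp" then ((k : Nat) : Int) + 1
         else ((k : Nat) : Int) + pvParseB (PySem.List.pyGetD (op :: tl) 1 ""))
        (ordJ ++ [((k : Nat) : Int)])
        = pvCalcLoop (commands.set k ((if op = "jmp" then "nop" else "jmp") :: tl)) f''
        a (if op = "jmp" then ((k : Nat) : Int) + 1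
           else ((k : Nat) : Int) + pvParseB (PySem.List.pyGetD (op :: tl) 1 ""))
        (ordJ ++ [((k : Nat) : Int)]) := by
      apply pvCalcLoop_fuel_eq _ hWFF _ _ _ _ _ hb0 (by rw [hlenF]; exact hb1)
      · rw [hlenF]
        exact le_trans (pvMu_le _ _) (by omega)
      · rw [hlenF]
        omega
    rw [htk, hgetD]
    unfold pvResume
    simp only [hres, hfuel, ← hA]

-- the main induction over the candidate indices
theorem pv_go_eq (commands : List (List String))
    (hpre : ∀ p ∈ PySem.List.enumerate commands 0,
      pvCmdOK (commands.length : Int) p.1 p.2 = true) :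
    ∀ ks : List Nat, (∀ k ∈ ks, k < commands.length) →
      ∀ st? : Option (Int × Int × PySem.Dict Int Int × List Int),
        (st? = none ∨ st? = some (pvFirstRun commands)) →
        pvModGo commands ks
          = pvAltGo commands (commands.length : Int) st?
              (ks.map (fun (k : Nat) => ((k : Int), commands.getD k []))) := by
  have hWF := pv_pre_destruct commands hpre
  intro ks
  induction ks with
  | nil => intro _ st? _; rfl
  | cons k rest ih =>
    intro hks st? hst
    have hk : k < commands.length := hks k (by simp)
    obtain ⟨op, tl, hc0, hops⟩ := hWF k hk
    have hgd : commands.getD k [] = op :: tl := by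
      rw [List.getD_eq_getElem _ _ hk]; exact hc0
    have hrest' : ∀ k' ∈ rest, k' < commands.length := fun k' h => hks k' (by simp [h])
    rw [List.map_cons, pvModGo, pvAltGo.eq_def, hgd]
    simp only [PySem.List.pyGetD_zero_cons]
    by_cases hjm : op = "jmp"
    · subst hjm
      have hcand := pv_cand_eq commands hWF k hk "jmp" tl hc0 (Or.inl rfl)
      simp only [String.reduceEq, reduceIte] at hcand ⊢
      simp only [List.set_cons_zero]
      rcases hst with rfl | rfl <;>
      · simp only [true_or, if_true]
        rcases hcand with ⟨hcf, hv1, hv2⟩ | ⟨hct, hres⟩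
        · rw [hcf, hv1, hv2]
          simp only [Bool.false_eq_true, if_false]
          by_cases hh : (pvFirstRun commands).2.1 = (commands.length : Int)
          · rw [if_pos hh, if_pos hh]
          · rw [if_neg hh, if_neg hh]
            exact ih hrest' (some (pvFirstRun commands)) (Or.inr rfl)
        · rw [hct, hres]
          simp only [if_true]
          by_cases hh : (pvCalculate (commands.set k ("nop" :: tl))).2
              = (commands.length : Int)
          · rw [if_pos hh, if_pos hh]
          · rw [if_neg hh, if_neg hh]
            exact ih hrest' (some (pvFirstRun commands)) (Or.inr rfl)
    · by_cases hnp : op = "nop"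
      · subst hnp
        have hcand := pv_cand_eq commands hWF k hk "nop" tl hc0 (Or.inr rfl)
        simp only [String.reduceEq, reduceIte] at hcand ⊢
        simp only [List.set_cons_zero]
        rcases hst with rfl | rfl <;>
        · simp only [or_true, if_true]
          rcases hcand with ⟨hcf, hv1, hv2⟩ | ⟨hct, hres⟩
          · rw [hcf, hv1, hv2]
            simp only [Bool.false_eq_true, if_false]
            by_cases hh : (pvFirstRun commands).2.1 = (commands.length : Int)
            · rw [if_pos hh, if_pos hh]
            · rw [if_neg hh, if_neg hh]
              exact ih hrest' (some (pvFirstRun commands)) (Or.inr rfl)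
          · rw [hct, hres]
            simp only [if_true]
            by_cases hh : (pvCalculate (commands.set k ("jmp" :: tl))).2
                = (commands.length : Int)
            · rw [if_pos hh, if_pos hh]
            · rw [if_neg hh, if_neg hh]
              exact ih hrest' (some (pvFirstRun commands)) (Or.inr rfl)
      · rw [if_neg hjm, if_neg hnp, if_neg (by tauto : ¬ (op = "jmp" ∨ op = "nop"))]
        exact ih hrest' st? hst

theorem pv_noCand_modGo (commands : List (List String)) (h : pvNoCand commands = true) :
    ∀ ks : List Nat, pvModGo commands ks = -1 := by
  have hc : ∀ c ∈ commands, ¬ PySem.List.pyGetD c 0 "" = "jmp"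
      ∧ ¬ PySem.List.pyGetD c 0 "" = "nop" := by
    intro c hcm
    have := (List.all_eq_true.mp h) c hcm
    simp only [Bool.and_eq_true, Bool.not_eq_eq_eq_not, Bool.not_true,
      beq_eq_false_iff_ne, ne_eq] at this
    exact ⟨this.1.2, this.2⟩
  intro ks
  induction ks with
  | nil => rfl
  | cons k rest ih =>
    have hk : ¬ PySem.List.pyGetD (commands.getD k []) 0 "" = "jmp"
        ∧ ¬ PySem.List.pyGetD (commands.getD k []) 0 "" = "nop" := by
      by_cases hkl : k < commands.length
      · rw [List.getD_eq_getElem _ _ hkl]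
        exact hc commands[k] (List.getElem_mem hkl)
      · rw [List.getD_eq_default _ _ (by omega)]
        exact ⟨by decide, by decide⟩
    rw [pvModGo, if_neg hk.1, if_neg hk.2]
    exact ih

theorem pv_noCand_altGo (commands : List (List String)) (n : Int)
    (h : pvNoCand commands = true) :
    ∀ (ps : List (Int × List String))
      (st? : Option (Int × Int × PySem.Dict Int Int × List Int)),
      (∀ p ∈ ps, p.2 ∈ commands) → pvAltGo commands n st? ps = -1 := by
  intro ps
  induction ps with
  | nil => intro st? _; rfl
  | cons p rest ih =>
    intro st? hps
    rcases p with ⟨i, cmd⟩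
    have hcm : cmd ∈ commands := hps (i, cmd) (by simp)
    have := (List.all_eq_true.mp h) cmd hcm
    simp only [Bool.and_eq_true, Bool.not_eq_eq_eq_not, Bool.not_true,
      beq_eq_false_iff_ne, ne_eq] at this
    have hop : ¬ (PySem.List.pyGetD cmd 0 "" = "jmp"
        ∨ PySem.List.pyGetD cmd 0 "" = "nop") := by tauto
    cases st? <;>
      (rw [pvAltGo.eq_def]; simp only []; rw [if_neg hop];
        exact ih _ (fun q hq => hps q (by simp [hq])))

-- ===== VERDICT (by name: the statement is the Claim_ definition above) =====
theorem calculate_modified_spec : Claim_equal_calculate_modified := by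
  intro commands _ hpre
  unfold Spec_calculate_modified calculate_modified calculate_modified_alt
  rcases hpre with h | hpre
  · rw [pv_noCand_modGo commands h, pv_noCand_altGo commands (commands.length : Int) h _ none
      (by
        intro p hp
        rw [PySem.List.mem_enumerate_iff] at hp
        obtain ⟨k, hk, rfl⟩ := hp
        exact List.getElem_mem hk)]
  · rw [pv_go_eq commands hpre (List.range commands.length) (by intro k hk; simpa using hk)
      none (Or.inl rfl)]
    congr 1
    rw [pv_enum_map commands [] 0]
    apply List.map_congr_left
    intro k _
    simp
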